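-- pv_equiv track=rewrite | github.com/sepideh77/Deep-Reinforcement-Learning-based-content-migration-DRLCM | environment.py | chunks_evenly
-- ===== SOURCE A (Python) =====
-- from itertools import accumulate, chain, repeat, tee
--
-- def chunks_evenly(xs, n):
--         assert n > 0
--         L = len(xs)
--         s, r = divmod(L, n)
--         widths = chain(repeat(s + 1, r), repeat(s, n - r))
--         offsets = accumulate(chain((0,), widths))
--         b, e = tee(offsets)
--         next(e)
--         return [xs[s] for s in map(slice, b, e)]
-- ===== SOURCE B (Python) =====
-- def chunks_evenly(xs, n):
--     assert n > 0
--     s, r = divmod(len(xs), n)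
--     def off(i):
--         return i * s + min(i, r)
--     return [xs[off(i):off(i + 1)] for i in range(n)]
-- ===== Notes on version B (the rewrite author's own statement) =====
-- stated objective: idiomatic
-- what changed: Replaces the itertools accumulate/tee/chain running-offset pipeline with a closed-form boundary function off(i) = i*s + min(i, r) and a plain list comprehension over range(n).
import Mathlib
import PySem

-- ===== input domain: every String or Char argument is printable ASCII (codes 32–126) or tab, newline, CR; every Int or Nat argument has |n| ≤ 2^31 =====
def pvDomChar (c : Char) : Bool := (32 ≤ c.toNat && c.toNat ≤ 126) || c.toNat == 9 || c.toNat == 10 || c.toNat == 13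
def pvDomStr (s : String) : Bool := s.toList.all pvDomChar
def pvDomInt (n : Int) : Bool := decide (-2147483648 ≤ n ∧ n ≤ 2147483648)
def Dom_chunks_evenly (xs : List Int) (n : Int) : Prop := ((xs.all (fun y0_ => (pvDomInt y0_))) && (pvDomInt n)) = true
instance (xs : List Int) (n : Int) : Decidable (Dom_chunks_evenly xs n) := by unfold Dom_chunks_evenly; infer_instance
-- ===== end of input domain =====

-- B replaces A's itertools running-offset pipeline with a closed-form boundary
-- function off(i) = i*s + min(i, r); same results, same cost (idiomatic rewrite).

-- ===== PORT A =====
-- 'accumulate(chain((0,), widths))' is List.scanl (·+·) 0 over the widths list;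
-- 'b, e = tee(offsets); next(e)' pairs consecutive offsets: offsets.zip offsets.tail.
def chunks_evenly (xs : List Int) (n : Int) : List (List Int) :=
  let L : Int := xs.length
  let s : Int := PySem.Int.floordiv L n
  let r : Int := PySem.Int.mod L n
  let widths : List Int := List.replicate r.toNat (s + 1) ++ List.replicate (n - r).toNat s
  let offsets : List Int := List.scanl (· + ·) 0 widths
  (offsets.zip offsets.tail).map (fun p => PySem.List.slice xs (some p.1) (some p.2))

-- ===== PORT B =====
def chunks_evenly_alt (xs : List Int) (n : Int) : List (List Int) :=
  let s : Int := PySem.Int.floordiv (xs.length : Int) n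
  let r : Int := PySem.Int.mod (xs.length : Int) n
  let off : Int → Int := fun i => i * s + min i r
  (PySem.List.pyRange 0 n 1).map (fun i => PySem.List.slice xs (some (off i)) (some (off (i + 1))))

-- ===== PRECONDITION & SPEC =====
-- Pre_ excludes exactly n ≤ 0, where A's 'assert n > 0' raises AssertionError.
def Pre_chunks_evenly (xs : List Int) (n : Int) : Prop := 0 < n
instance (xs : List Int) (n : Int) : Decidable (Pre_chunks_evenly xs n) := by unfold Pre_chunks_evenly; infer_instance
def pvWitness_chunks_evenly : List Int × Int := ([1, 2, 3, 4, 5], 2)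

def Spec_chunks_evenly (xs : List Int) (n : Int) (out : List (List Int)) : Prop := out = chunks_evenly_alt xs n
instance (xs : List Int) (n : Int) (out : List (List Int)) : Decidable (Spec_chunks_evenly xs n out) := by unfold Spec_chunks_evenly; infer_instance

-- ===== CLAIM (what is proved, stated in full; the proofs are below) =====
def Claim_equal_chunks_evenly : Prop := ∀ (xs : List Int) (n : Int), Dom_chunks_evenly xs n → Pre_chunks_evenly xs n → Spec_chunks_evenly xs n (chunks_evenly xs n)

-- ===== LEMMAS AND PROOFS =====

-- prefix sums of a constant list, in closed form
theorem pv_scanl_replicate (k : ℕ) (a w : Int) :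
    List.scanl (· + ·) a (List.replicate k w)
      = (List.range (k + 1)).map (fun (i : ℕ) => a + (i : Int) * w) := by
  induction k generalizing a with
  | zero => simp [List.scanl]
  | succ k ih =>
      rw [List.replicate_succ, List.scanl_cons, ih (a + w)]
      conv_rhs => rw [List.range_succ_eq_map]
      simp only [List.map_cons, List.map_map]
      congr 1
      · simp
      · apply List.map_congr_left
        intro i _
        simp only [Function.comp]
        push_cast
        ring

theorem pv_foldl_add_replicate (k : ℕ) (a w : Int) :
    (List.replicate k w).foldl (· + ·) a = a + (k : Int) * w := by
  induction k generalizing a with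
  | zero => simp
  | succ k ih =>
      rw [List.replicate_succ]
      simp only [List.foldl_cons]
      rw [ih (a + w)]
      push_cast
      ring

theorem pv_scanl_append (l1 l2 : List Int) (a : Int) :
    List.scanl (· + ·) a (l1 ++ l2)
      = List.scanl (· + ·) a l1 ++ (List.scanl (· + ·) (l1.foldl (· + ·) a) l2).tail := by
  induction l1 generalizing a with
  | nil => cases l2 <;> simp [List.scanl_nil, List.scanl_cons]
  | cons x l1 ih => simp [List.scanl_cons, ih (a + x)]

-- pairing each element of a mapped range with its successor
theorem pv_zip_tail_range' {α : Type} (f : ℕ → α) (m a : ℕ) :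
    (((List.range' a (m + 1)).map f).zip ((List.range' a (m + 1)).map f).tail)
      = (List.range' a m).map (fun i => (f i, f (i + 1))) := by
  induction m generalizing a with
  | zero => simp
  | succ m ih =>
      rw [List.range'_succ]
      rw [List.range'_succ (s := a + 1)]
      simp only [List.map_cons, List.tail_cons, List.zip_cons_cons]
      rw [List.range'_succ (s := a)]
      simp only [List.map_cons]
      refine congrArg₂ _ rfl ?_
      have := ih (a + 1)
      rw [List.range'_succ] at this
      exact this

theorem pv_zip_tail_range {α : Type} (f : ℕ → α) (m : ℕ) :
    (((List.range (m + 1)).map f).zip ((List.range (m + 1)).map f).tail)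
      = (List.range m).map (fun i => (f i, f (i + 1))) := by
  rw [List.range_eq_range', List.range_eq_range']
  exact pv_zip_tail_range' f m 0

-- the offsets list of A, in B's closed form
theorem pv_offsets_closed (N L : ℕ) (hN : 0 < N) :
    List.scanl (· + ·) 0
        (List.replicate (L % N) ((L / N : ℕ) + 1 : Int)
          ++ List.replicate (N - L % N) ((L / N : ℕ) : Int))
      = (List.range (N + 1)).map
          (fun (i : ℕ) => (i : Int) * ((L / N : ℕ) : Int) + min (i : Int) ((L % N : ℕ) : Int)) := by
  have hr : L % N < N := Nat.mod_lt _ hN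
  set s : Int := ((L / N : ℕ) : Int) with hs
  set r : ℕ := L % N with hrdef
  rw [pv_scanl_append, pv_scanl_replicate, pv_foldl_add_replicate, pv_scanl_replicate]
  have hsplit : N + 1 = (r + 1) + (N - r) := by omega
  rw [hsplit]
  conv_rhs => rw [List.range_add, List.map_append, List.map_map]
  refine congrArg₂ _ ?_ ?_
  · apply List.map_congr_left
    intro i hi
    rw [List.mem_range] at hi
    have : min (i : Int) (r : Int) = (i : Int) := by
      apply min_eq_left; exact_mod_cast Nat.le_of_lt_succ hi
    rw [this]; ring
  · -- tail of the second scanl piece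
    have : N - r = (N - r - 1) + 1 := by omega
    rw [this, List.range_succ_eq_map]
    simp only [List.map_cons, List.map_map, List.tail_cons]
    apply List.map_congr_left
    intro j _
    simp only [Function.comp]
    push_cast
    have hmin : min ((r : Int) + 1 + (j : Int)) (r : Int) = (r : Int) := min_eq_right (by omega)
    rw [hmin]
    ring

-- ===== VERDICT (by name: the statement is the Claim_ definition above) =====
theorem chunks_evenly_spec : Claim_equal_chunks_evenly := by
  intro xs n _ hpre
  unfold Spec_chunks_evenly chunks_evenly chunks_evenly_alt
  have hn : 0 < n := hpre
  obtain ⟨N, rfl⟩ : ∃ N : ℕ, n = (N : Int) := ⟨n.toNat, (Int.toNat_of_nonneg hn.le).symm⟩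
  have hN : 0 < N := by exact_mod_cast hn
  set L : ℕ := xs.length with hL
  simp only [PySem.Int.floordiv_natCast, PySem.Int.mod_natCast]
  have h1 : (((L % N : ℕ) : Int)).toNat = L % N := Int.toNat_natCast _
  have hr : L % N < N := Nat.mod_lt _ hN
  have h2 : ((N : Int) - ((L % N : ℕ) : Int)).toNat = N - L % N := by omega
  rw [h1, h2, pv_offsets_closed N L hN]
  set f : ℕ → Int := fun (i : ℕ) => (i : Int) * ((L / N : ℕ) : Int) + min (i : Int) ((L % N : ℕ) : Int) with hf
  rw [pv_zip_tail_range f N, List.map_map]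
  rw [PySem.List.pyRange_one, List.map_map]
  simp only [Int.sub_zero, Int.toNat_natCast]
  apply List.map_congr_left
  intro i _
  simp only [Function.comp, hf]
  push_cast
  ring_nf
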